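-- pv_equiv track=rewrite | github.com/philipdongfei/Think-python-2end | Chapter09/Ex9_7.py | is_triple_double
-- ===== SOURCE A (Python) =====
-- def is_triple_double(word):
--     i = 0
--     count = 0
--     while i < len(word)-1:
--         if word[i] == word[i+1]:
--             count = count+1
--             if count == 3:
--                 return True
--             i = i + 2
--         else:
--             i = i + 1 - 2*count
--             count = 0
--     return False
-- ===== SOURCE B (Python) =====
-- def is_triple_double(word):
--     for j in range(len(word) - 5):
--         if word[j] == word[j + 1] and word[j + 2] == word[j + 3] and word[j + 4] == word[j + 5]:
--             return True
--     return False
-- ===== Notes on version B (the rewrite author's own statement) =====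
-- stated objective: simpler
-- what changed: Replaces A's stateful greedy pair-consuming loop with manual index backtracking (i = i+1-2*count on mismatch) by a plain scan over every start index j testing the six-character window word[j..j+5] with fixed offsets.
import Mathlib
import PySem

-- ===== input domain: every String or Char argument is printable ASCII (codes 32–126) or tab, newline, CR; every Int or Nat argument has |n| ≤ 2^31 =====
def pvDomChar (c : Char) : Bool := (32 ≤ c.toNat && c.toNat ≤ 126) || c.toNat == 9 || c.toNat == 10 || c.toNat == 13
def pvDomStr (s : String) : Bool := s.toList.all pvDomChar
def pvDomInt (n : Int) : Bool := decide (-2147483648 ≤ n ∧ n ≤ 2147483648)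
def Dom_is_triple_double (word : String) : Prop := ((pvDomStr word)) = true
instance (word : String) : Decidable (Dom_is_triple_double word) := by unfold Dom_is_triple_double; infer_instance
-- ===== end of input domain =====

-- B replaces A's greedy pair-consuming loop with manual backtracking by a plain
-- fixed-offset window scan over every start index (objective: simpler).

-- ===== PORT A =====
-- A's while loop, step for step; the fuel only makes the backtracking loop a
-- structural recursion and is proved sufficient below (pvLoopA_iff), so the
-- fuel-0 branch is never reached on the actual call.
def pvLoopA (word : String) (fuel : Nat) (i count : Int) : Bool :=
  match fuel with
  | 0 => false
  | Nat.succ fuel =>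
    if i < PySem.Str.len word - 1 then
      if PySem.Str.pyGet? word i == PySem.Str.pyGet? word (i + 1) then
        if count + 1 == 3 then true
        else pvLoopA word fuel (i + 2) (count + 1)
      else pvLoopA word fuel (i + 1 - 2 * count) 0
    else false

def is_triple_double (word : String) : Bool :=
  pvLoopA word (3 * word.toList.length + 3) 0 0

-- ===== PORT B =====
-- Source B's for-loop over range(len(word)-5) with early return True = List.any.
def is_triple_double_alt (word : String) : Bool :=
  (PySem.List.pyRange 0 (PySem.Str.len word - 5) 1).any (fun j =>
    (PySem.Str.pyGet? word j == PySem.Str.pyGet? word (j + 1)) &&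
    (PySem.Str.pyGet? word (j + 2) == PySem.Str.pyGet? word (j + 3)) &&
    (PySem.Str.pyGet? word (j + 4) == PySem.Str.pyGet? word (j + 5)))

-- ===== PRECONDITION & SPEC =====
def Spec_is_triple_double (word : String) (out : Bool) : Prop := out = is_triple_double_alt word
instance (word : String) (out : Bool) : Decidable (Spec_is_triple_double word out) := by unfold Spec_is_triple_double; infer_instance

-- ===== CLAIM (what is proved, stated in full; the proofs are below) =====
def Claim_equal_is_triple_double : Prop := ∀ (word : String), Dom_is_triple_double word → Spec_is_triple_double word (is_triple_double word)

-- ===== LEMMAS AND PROOFS =====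

-- "some start j ≥ s carries three consecutive doubled letters"
def pvWin (word : String) (s : Nat) : Prop :=
  ∃ j : Nat, s ≤ j ∧ j + 5 < word.toList.length ∧
    word.toList[j]? = word.toList[j + 1]? ∧
    word.toList[j + 2]? = word.toList[j + 3]? ∧
    word.toList[j + 4]? = word.toList[j + 5]?

theorem pvLoopA_iff (word : String) :
    ∀ (fuel s c : Nat), c ≤ 2 →
    (∀ t, t < c → word.toList[s + 2 * t]? = word.toList[s + 2 * t + 1]?) →
    3 * (word.toList.length - s) + 3 - c ≤ fuel →
    (pvLoopA word fuel ((s + 2 * c : Nat) : Int) ((c : Nat) : Int) = true ↔ pvWin word s) := by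
  intro fuel
  induction fuel with
  | zero => intro s c hc _ hf; exact absurd hf (by omega)
  | succ fuel ih =>
    intro s c hc hinv hf
    rw [pvLoopA]
    by_cases hlt : ((s + 2 * c : Nat) : Int) < PySem.Str.len word - 1
    · rw [if_pos hlt]
      simp only [PySem.Str.len_eq] at hlt
      have hlt' : s + 2 * c + 1 < word.toList.length := by omega
      by_cases heq : word.toList[s + 2 * c]? = word.toList[s + 2 * c + 1]?
      · have hbeq : (PySem.Str.pyGet? word ((s + 2 * c : Nat) : Int) ==
            PySem.Str.pyGet? word (((s + 2 * c : Nat) : Int) + 1)) = true := by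
          have e : (((s + 2 * c : Nat) : Int) + 1) = ((s + 2 * c + 1 : Nat) : Int) := by
            push_cast; ring
          rw [e]; simp only [PySem.Str.pyGet?_natCast, beq_iff_eq]; exact heq
        rw [if_pos hbeq]
        by_cases hc3 : c = 2
        · subst hc3
          have h3 : ((((2 : Nat)) : Int) + 1 == (3 : Int)) = true := by norm_num
          rw [if_pos h3]
          constructor
          · intro _
            refine ⟨s, le_refl s, by omega, ?_, ?_, ?_⟩
            · simpa using hinv 0 (by omega)
            · simpa using hinv 1 (by omega)
            · simpa using heq
          · intro _; rfl
        · have hcne : ((((c : Nat)) : Int) + 1 == (3 : Int)) = false := by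
            simp only [beq_eq_false_iff_ne, ne_eq]
            intro h; exact hc3 (by omega)
          rw [hcne, if_neg (by simp)]
          have hcast1 : (((s + 2 * c : Nat) : Int) + 2) = ((s + 2 * (c + 1) : Nat) : Int) := by
            push_cast; ring
          have hcast2 : ((((c : Nat)) : Int) + 1) = (((c + 1 : Nat)) : Int) := by push_cast; ring
          rw [hcast1, hcast2]
          apply ih s (c + 1) (by omega)
          · intro t ht
            rcases Nat.lt_or_ge t c with h | h
            · exact hinv t h
            · have htc : t = c := by omega
              subst htc; exact heq
          · omega
      · have hbeq : (PySem.Str.pyGet? word ((s + 2 * c : Nat) : Int) ==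
            PySem.Str.pyGet? word (((s + 2 * c : Nat) : Int) + 1)) = false := by
          have e : (((s + 2 * c : Nat) : Int) + 1) = ((s + 2 * c + 1 : Nat) : Int) := by
            push_cast; ring
          rw [e]
          simp only [PySem.Str.pyGet?_natCast, beq_eq_false_iff_ne, ne_eq]
          exact heq
        rw [hbeq, if_neg (by simp)]
        have hcast : (((s + 2 * c : Nat) : Int) + 1 - 2 * ((c : Nat) : Int))
            = (((s + 1) + 2 * 0 : Nat) : Int) := by push_cast; ring
        rw [hcast, show (0 : Int) = ((0 : Nat) : Int) from rfl]
        rw [ih (s + 1) 0 (by omega) (fun t ht => absurd ht (by omega)) (by omega)]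
        constructor
        · rintro ⟨j, hj, hjn, h1, h2, h3⟩
          exact ⟨j, by omega, hjn, h1, h2, h3⟩
        · rintro ⟨j, hj, hjn, h1, h2, h3⟩
          refine ⟨j, ?_, hjn, h1, h2, h3⟩
          rcases Nat.lt_or_ge s j with h | h
          · omega
          · exfalso
            have hjs : j = s := by omega
            subst hjs
            interval_cases c
            · exact heq (by simpa using h1)
            · exact heq (by simpa using h2)
            · exact heq (by simpa using h3)
    · rw [if_neg hlt]
      simp only [PySem.Str.len_eq, not_lt] at hlt
      constructor
      · intro h; exact absurd h (by simp)
      · rintro ⟨j, hj, hjn, _⟩; omega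

theorem pvAlt_iff (word : String) : is_triple_double_alt word = true ↔ pvWin word 0 := by
  unfold is_triple_double_alt
  rw [List.any_eq_true]
  constructor
  · rintro ⟨j, hmem, hp⟩
    rw [PySem.List.mem_pyRange_one] at hmem
    obtain ⟨hj0, hjn⟩ := hmem
    simp only [PySem.Str.len_eq] at hjn
    have hj' : j = ((j.toNat : Nat) : Int) := (Int.toNat_of_nonneg hj0).symm
    rw [hj'] at hp
    have h5 : j.toNat + 5 < word.toList.length := by omega
    have e1 : (((j.toNat : Nat) : Int) + 1) = ((j.toNat + 1 : Nat) : Int) := by push_cast; ring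
    have e2 : (((j.toNat : Nat) : Int) + 2) = ((j.toNat + 2 : Nat) : Int) := by push_cast; ring
    have e3 : (((j.toNat : Nat) : Int) + 3) = ((j.toNat + 3 : Nat) : Int) := by push_cast; ring
    have e4 : (((j.toNat : Nat) : Int) + 4) = ((j.toNat + 4 : Nat) : Int) := by push_cast; ring
    have e5 : (((j.toNat : Nat) : Int) + 5) = ((j.toNat + 5 : Nat) : Int) := by push_cast; ring
    rw [e1, e2, e3, e4, e5] at hp
    simp only [PySem.Str.pyGet?_natCast, Bool.and_eq_true, beq_iff_eq] at hp
    exact ⟨j.toNat, Nat.zero_le _, h5, hp.1.1, hp.1.2, hp.2⟩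
  · rintro ⟨j, _, hjn, h1, h2, h3⟩
    refine ⟨(j : Int), ?_, ?_⟩
    · rw [PySem.List.mem_pyRange_one]
      simp only [PySem.Str.len_eq]
      omega
    · have e1 : ((j : Nat) : Int) + 1 = ((j + 1 : Nat) : Int) := by push_cast; ring
      have e2 : ((j : Nat) : Int) + 2 = ((j + 2 : Nat) : Int) := by push_cast; ring
      have e3 : ((j : Nat) : Int) + 3 = ((j + 3 : Nat) : Int) := by push_cast; ring
      have e4 : ((j : Nat) : Int) + 4 = ((j + 4 : Nat) : Int) := by push_cast; ring
      have e5 : ((j : Nat) : Int) + 5 = ((j + 5 : Nat) : Int) := by push_cast; ring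
      rw [e1, e2, e3, e4, e5]
      simp only [PySem.Str.pyGet?_natCast, Bool.and_eq_true, beq_iff_eq]
      exact ⟨⟨h1, h2⟩, h3⟩

-- ===== VERDICT (by name: the statement is the Claim_ definition above) =====
theorem is_triple_double_spec : Claim_equal_is_triple_double := by
  intro word _
  unfold Spec_is_triple_double is_triple_double
  rw [Bool.eq_iff_iff]
  have h := pvLoopA_iff word (3 * word.toList.length + 3) 0 0 (by omega)
    (fun t ht => absurd ht (by omega)) (by omega)
  norm_num at h
  exact h.trans (pvAlt_iff word).symm
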